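-- pv_equiv track=rewrite | github.com/DaneLyttinen/ode-glucose-forecasting | estimateMeals.py | find_expanding_windows
-- ===== SOURCE A (Python) =====
-- def find_expanding_windows(indexes, threshold=10):
--     if not indexes:
--         return []
--
--     windows = []
--     current_window = [indexes[0]]
--
--     for i in range(1, len(indexes)):
--         if indexes[i] - indexes[i - 1] <= threshold:
--             current_window.append(indexes[i])
--         else:
--             windows.append(current_window)
--             current_window = [indexes[i]]
--
--     windows.append(current_window)  # Append the last window
--
--     return windows
-- ===== SOURCE B (Python) =====
-- def find_expanding_windows(indexes, threshold=10):
--     if not indexes: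
--         return []
--     n = len(indexes)
--     cuts = [i for i in range(1, n) if indexes[i] - indexes[i - 1] > threshold]
--     bounds = [0] + cuts + [n]
--     return [indexes[a:b] for a, b in zip(bounds, bounds[1:])]
-- ===== Notes on version B (the rewrite author's own statement) =====
-- stated objective: alternative
-- what changed: Instead of maintaining a running current_window while folding, B first computes the list of cut positions (indices whose gap exceeds the threshold) and then builds each window by slicing the input between consecutive boundaries.
import Mathlib
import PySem

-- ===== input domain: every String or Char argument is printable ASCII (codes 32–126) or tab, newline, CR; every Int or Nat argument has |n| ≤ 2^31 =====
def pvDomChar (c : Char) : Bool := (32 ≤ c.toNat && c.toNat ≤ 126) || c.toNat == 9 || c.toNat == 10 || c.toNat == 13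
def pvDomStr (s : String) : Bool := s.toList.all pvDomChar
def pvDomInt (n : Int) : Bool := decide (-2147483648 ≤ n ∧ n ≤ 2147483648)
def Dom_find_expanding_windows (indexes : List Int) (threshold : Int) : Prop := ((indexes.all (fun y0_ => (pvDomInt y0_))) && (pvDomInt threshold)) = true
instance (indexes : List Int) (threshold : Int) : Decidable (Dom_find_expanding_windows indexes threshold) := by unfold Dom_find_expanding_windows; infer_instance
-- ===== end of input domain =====

-- B replaces A's running current_window fold by computing the cut positions first and slicing the
-- input between consecutive boundaries (alternative decomposition, same cost).


-- ===== PORT A =====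
-- literal transliteration of A: fold over range(1, len(indexes)) maintaining (windows, current_window)
def find_expanding_windows (indexes : List Int) (threshold : Int) : List (List Int) :=
  match indexes with
  | [] => []
  | x0 :: _ =>
    let st := (PySem.List.pyRange 1 (indexes.length : Int)).foldl
      (fun (s : List (List Int) × List Int) i =>
        if PySem.List.pyGetD indexes i 0 - PySem.List.pyGetD indexes (i - 1) 0 ≤ threshold then
          (s.1, s.2 ++ [PySem.List.pyGetD indexes i 0])
        else
          (s.1 ++ [s.2], [PySem.List.pyGetD indexes i 0]))
      (([] : List (List Int)), [x0])
    st.1 ++ [st.2]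

-- ===== PORT B =====
-- literal transliteration of B: cut positions, then slices between consecutive boundaries
def find_expanding_windows_alt (indexes : List Int) (threshold : Int) : List (List Int) :=
  match indexes with
  | [] => []
  | _ :: _ =>
    let n : Int := indexes.length
    let cuts := (PySem.List.pyRange 1 n).filter
      (fun i => decide (threshold < PySem.List.pyGetD indexes i 0 - PySem.List.pyGetD indexes (i - 1) 0))
    let bounds : List Int := 0 :: (cuts ++ [n])
    (bounds.zip bounds.tail).map (fun p => PySem.List.slice indexes (some p.1) (some p.2))

-- ===== PRECONDITION & SPEC =====
def Spec_find_expanding_windows (indexes : List Int) (threshold : Int) (out : List (List Int)) : Prop := out = find_expanding_windows_alt indexes threshold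
instance (indexes : List Int) (threshold : Int) (out : List (List Int)) : Decidable (Spec_find_expanding_windows indexes threshold out) := by unfold Spec_find_expanding_windows; infer_instance

-- ===== CLAIM (what is proved, stated in full; the proofs are below) =====
def Claim_equal_find_expanding_windows : Prop := ∀ (indexes : List Int) (threshold : Int), Dom_find_expanding_windows indexes threshold → Spec_find_expanding_windows indexes threshold (find_expanding_windows indexes threshold)

-- ===== LEMMAS AND PROOFS =====

-- canonical chunking: given the last-seen element x and the remaining tail, return
-- (the rest of x's window, the later windows)
def pvCt (t : Int) : Int → List Int → List Int × List (List Int)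
  | _, [] => ([], [])
  | x, y :: ys =>
    let r := pvCt t y ys
    if y - x ≤ t then (y :: r.1, r.2) else ([], (y :: r.1) :: r.2)

-- slicing L at consecutive boundaries a :: bs
def pvSlices (L : List Int) : Int → List Int → List (List Int)
  | _, [] => []
  | a, b :: bs => PySem.List.slice L (some a) (some b) :: pvSlices L b bs

-- A's loop, started after position j with accumulator (ws, cur), ends as ws ++ the chunks of the tail
theorem pvA_run (L : List Int) (t : Int) :
    ∀ (rest : List Int) (j : Nat) (x : Int) (ws : List (List Int)) (cur : List Int),
      L.drop j = x :: rest →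
      (let r := (PySem.List.pyRange ((j : Int) + 1) (L.length : Int)).foldl
          (fun (s : List (List Int) × List Int) i =>
            if PySem.List.pyGetD L i 0 - PySem.List.pyGetD L (i - 1) 0 ≤ t then
              (s.1, s.2 ++ [PySem.List.pyGetD L i 0])
            else
              (s.1 ++ [s.2], [PySem.List.pyGetD L i 0])) (ws, cur)
       r.1 ++ [r.2]) = ws ++ (cur ++ (pvCt t x rest).1) :: (pvCt t x rest).2 := by
  intro rest
  induction rest with
  | nil =>
    intro j x ws cur hj
    have hlen : L.length = j + 1 := by
      have := congrArg List.length hj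
      simp at this
      omega
    rw [PySem.List.pyRange_one_eq_nil (by rw [hlen]; push_cast; omega)]
    simp [pvCt]
  | cons y ys ih =>
    intro j x ws cur hj
    have hx : L[j]? = some x := by rw [← List.head?_drop, hj]; rfl
    have hy : L[j+1]? = some y := by
      rw [← List.head?_drop]
      have : L.drop (j+1) = y :: ys := by
        have := congrArg List.tail hj
        simpa [List.tail_drop] using this
      rw [this]; rfl
    have hjlt : (j:Int) + 1 < (L.length : Int) := by
      have h2 : j + 1 < L.length := by
        obtain ⟨h, _⟩ := List.getElem?_eq_some_iff.mp hy
        exact h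
      omega
    rw [PySem.List.pyRange_one_cons hjlt]
    simp only [List.foldl_cons]
    have e1 : PySem.List.pyGetD L ((j:Int) + 1) 0 = y := by
      have : ((j:Int) + 1) = ((j+1 : Nat) : Int) := by push_cast; ring
      rw [this, PySem.List.pyGetD_natCast, List.getD_eq_getElem?_getD, hy]; rfl
    have e0 : PySem.List.pyGetD L ((j:Int) + 1 - 1) 0 = x := by
      have : ((j:Int) + 1 - 1) = ((j : Nat) : Int) := by push_cast; ring
      rw [this, PySem.List.pyGetD_natCast, List.getD_eq_getElem?_getD, hx]; rfl
    rw [e1, e0]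
    have hdrop : L.drop (j+1) = y :: ys := by
      have := congrArg List.tail hj
      simpa [List.tail_drop] using this
    have harg : ((j:Int) + 1 + 1) = (((j+1 : Nat)):Int) + 1 := by push_cast; ring
    by_cases hc : y - x ≤ t
    · rw [if_pos hc]
      rw [harg]
      rw [ih (j+1) y ws (cur ++ [y]) hdrop]
      simp [pvCt, hc]
    · rw [if_neg hc]
      rw [harg]
      rw [ih (j+1) y (ws ++ [cur]) [y] hdrop]
      simp [pvCt, hc]

-- slice L j c = L[j] :: slice L (j+1) c when j < c
theorem pvSlice_cons (L : List Int) (j : Nat) (x : Int) (c : Int)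
    (hx : L.drop j = x :: L.drop (j+1)) (hc : (j:Int) < c) :
    PySem.List.slice L (some (j:Int)) (some c) =
      x :: PySem.List.slice L (some ((j:Int)+1)) (some c) := by
  have hcc : c = ((c.toNat : Nat) : Int) := by omega
  have h1 : ((j:Int)+1) = (((j+1:Nat)) : Int) := by push_cast; ring
  rw [hcc, h1, PySem.List.slice_natCast, PySem.List.slice_natCast]
  rw [hx]
  have : c.toNat - j = (c.toNat - (j+1)) + 1 := by omega
  rw [this]
  simp [List.take_succ_cons]

-- B's slices at the cut positions after j produce the chunks of the tail
theorem pvB_run (L : List Int) (t : Int) :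
    ∀ (rest : List Int) (j : Nat) (x : Int),
      L.drop j = x :: rest →
      pvSlices L (j : Int)
        (((PySem.List.pyRange ((j:Int)+1) (L.length : Int)).filter
            (fun i => decide (t < PySem.List.pyGetD L i 0 - PySem.List.pyGetD L (i - 1) 0)))
          ++ [(L.length : Int)]) =
      (x :: (pvCt t x rest).1) :: (pvCt t x rest).2 := by
  intro rest
  induction rest with
  | nil =>
    intro j x hj
    have hlen : L.length = j + 1 := by
      have := congrArg List.length hj
      simp at this
      omega
    rw [PySem.List.pyRange_one_eq_nil (by rw [hlen]; push_cast; omega)]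
    simp only [List.filter_nil, List.nil_append, pvSlices]
    have hs : PySem.List.slice L (some (j:Int)) (some (L.length : Int)) = [x] := by
      have h1 : (L.length : Int) = ((j+1 : Nat):Int) := by rw [hlen]
      rw [h1, PySem.List.slice_natCast, hj]
      have h2 : j + 1 - j = 1 := by omega
      rw [h2]
      rfl
    rw [hs]
    simp [pvCt]
  | cons y ys ih =>
    intro j x hj
    have hdrop : L.drop (j+1) = y :: ys := by
      have := congrArg List.tail hj
      simpa [List.tail_drop] using this
    have hx : L[j]? = some x := by rw [← List.head?_drop, hj]; rfl
    have hy : L[j+1]? = some y := by rw [← List.head?_drop, hdrop]; rfl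
    have h2 : j + 1 < L.length := by
      obtain ⟨h, _⟩ := List.getElem?_eq_some_iff.mp hy
      exact h
    have hjlt : (j:Int) + 1 < (L.length : Int) := by push_cast; omega
    rw [PySem.List.pyRange_one_cons hjlt]
    have e1 : PySem.List.pyGetD L ((j:Int) + 1) 0 = y := by
      have h : ((j:Int) + 1) = ((j+1 : Nat) : Int) := by push_cast; ring
      rw [h, PySem.List.pyGetD_natCast, List.getD_eq_getElem?_getD, hy]; rfl
    have e0 : PySem.List.pyGetD L ((j:Int) + 1 - 1) 0 = x := by
      have h : ((j:Int) + 1 - 1) = ((j : Nat) : Int) := by push_cast; ring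
      rw [h, PySem.List.pyGetD_natCast, List.getD_eq_getElem?_getD, hx]; rfl
    have harg : ((j:Int) + 1 + 1) = (((j+1 : Nat)):Int) + 1 := by push_cast; ring
    have hxcons : L.drop j = x :: L.drop (j+1) := by rw [hj, hdrop]
    simp only [List.filter_cons, e1, e0]
    by_cases hc : t < y - x
    · rw [if_pos (by simpa using hc)]
      simp only [List.cons_append, pvSlices]
      have hs : PySem.List.slice L (some (j:Int)) (some ((j:Int)+1)) = [x] := by
        rw [pvSlice_cons L j x ((j:Int)+1) hxcons (by omega)]
        have h1 : ((j:Int)+1) = (((j+1:Nat)):Int) := by push_cast; ring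
        rw [h1, PySem.List.slice_natCast]
        simp
      rw [hs, harg]
      have h1 : ((j:Int)+1) = (((j+1:Nat)):Int) := by push_cast; ring
      rw [h1, ih (j+1) y hdrop]
      simp [pvCt, not_le.mpr hc]
    · rw [if_neg (by simpa using hc)]
      rw [harg]
      have hmem : ∀ c, c ∈ ((PySem.List.pyRange (((j+1:Nat):Int)+1) (L.length : Int)).filter
            (fun i => decide (t < PySem.List.pyGetD L i 0 - PySem.List.pyGetD L (i - 1) 0))) ++ [(L.length : Int)] →
            ((j:Int)+1) < c := by
        intro c hcmem
        rcases List.mem_append.mp hcmem with h | h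
        · have := PySem.List.mem_pyRange_one.mp (List.mem_of_mem_filter h)
          push_cast at this ⊢
          omega
        · simp at h
          subst h
          omega
      set bs := ((PySem.List.pyRange (((j+1:Nat):Int)+1) (L.length : Int)).filter
            (fun i => decide (t < PySem.List.pyGetD L i 0 - PySem.List.pyGetD L (i - 1) 0))) ++ [(L.length : Int)] with hbs
      obtain ⟨c, bs', hbseq⟩ : ∃ c bs', bs = c :: bs' := by
        cases hbse : bs with
        | nil => exact absurd (hbs ▸ hbse) (by simp)
        | cons c bs' => exact ⟨c, bs', rfl⟩
      have hcgt : ((j:Int)+1) < c := hmem c (by rw [hbseq]; exact List.mem_cons_self ..)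
      rw [hbseq]
      simp only [pvSlices]
      rw [pvSlice_cons L j x c hxcons (by omega)]
      have h1 : ((j:Int)+1) = (((j+1:Nat)):Int) := by push_cast; ring
      have := ih (j+1) y hdrop
      rw [← hbs] at this
      rw [hbseq] at this
      simp only [pvSlices] at this
      rw [h1]
      rw [List.cons.injEq] at this ⊢
      constructor
      · rw [← h1] at this ⊢
        rw [this.1]
        simp [pvCt, not_lt.mp hc]
      · rw [this.2]
        simp [pvCt, not_lt.mp hc]

-- B's map over zipped consecutive boundary pairs is pvSlices
theorem pvZip_slices (L : List Int) : ∀ (bs : List Int) (a : Int),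
    (((a :: bs).zip ((a :: bs).tail)).map
      (fun p => PySem.List.slice L (some p.1) (some p.2))) = pvSlices L a bs := by
  intro bs
  induction bs with
  | nil => intro a; rfl
  | cons b bs ih =>
    intro a
    simp only [List.tail_cons, List.zip_cons_cons, List.map_cons, pvSlices]
    rw [← ih b]
    rfl

-- ===== VERDICT (by name: the statement is the Claim_ definition above) =====
theorem find_expanding_windows_spec : Claim_equal_find_expanding_windows := by
  intro indexes t _
  unfold Spec_find_expanding_windows
  cases indexes with
  | nil => rfl
  | cons x rest =>
    have hA := pvA_run (x :: rest) t rest 0 x [] [x] (by simp)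
    have hB := pvB_run (x :: rest) t rest 0 x (by simp)
    simp only [Nat.cast_zero, zero_add] at hA hB
    simp only [find_expanding_windows, find_expanding_windows_alt]
    rw [hA]
    rw [pvZip_slices, hB]
    simp
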